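-- pv_equiv track=rewrite | github.com/stenknutsen/HomeGrownPOSTagger | PhaseThreeTagging.py | N_UNK_TO_VerbTagger
-- ===== SOURCE A (Python) =====
-- def N_UNK_TO_VerbTagger(sent):
--     sentToReturn = []
--     skip = 0
--
--     for i in range(len(sent)):
--
--         if skip>0:
--             skip = skip -1
--             continue
--
--         if (i)<0 | (i+2)>=len(sent):
--             sentToReturn += [sent[i]]
--             continue
--
--         leftContext = sent[i]
--         target = sent[i+1]
--         rightContext = sent[i+2]
--
--         if (leftContext[1].startswith("N"))&(rightContext[1]=="TO")&(target[1]=="UNK"):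
--
--             sentToReturn += [leftContext]
--             sentToReturn += [(target[0],"V")]
--             sentToReturn += [rightContext]
--             skip = 2
--
--         else:
--             sentToReturn += [leftContext]
--
--     return sentToReturn
-- ===== SOURCE B (Python) =====
-- def N_UNK_TO_VerbTagger(sent):
--     n = len(sent)
--
--     def retag(j):
--         return (1 <= j and j + 1 < n
--                 and sent[j][1] == "UNK"
--                 and sent[j - 1][1].startswith("N")
--                 and sent[j + 1][1] == "TO")
--
--     return [(sent[j][0], "V") if retag(j) else sent[j] for j in range(n)]
-- ===== Notes on version B (the rewrite author's own statement) =====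
-- stated objective: simpler
-- what changed: Replaced the stateful scanner (skip counter, triple lookahead emitting three tokens at once) by a stateless per-index comprehension that retags position j by inspecting its two neighbours; the skip state is provably inert because matches cannot overlap.
import Mathlib
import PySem

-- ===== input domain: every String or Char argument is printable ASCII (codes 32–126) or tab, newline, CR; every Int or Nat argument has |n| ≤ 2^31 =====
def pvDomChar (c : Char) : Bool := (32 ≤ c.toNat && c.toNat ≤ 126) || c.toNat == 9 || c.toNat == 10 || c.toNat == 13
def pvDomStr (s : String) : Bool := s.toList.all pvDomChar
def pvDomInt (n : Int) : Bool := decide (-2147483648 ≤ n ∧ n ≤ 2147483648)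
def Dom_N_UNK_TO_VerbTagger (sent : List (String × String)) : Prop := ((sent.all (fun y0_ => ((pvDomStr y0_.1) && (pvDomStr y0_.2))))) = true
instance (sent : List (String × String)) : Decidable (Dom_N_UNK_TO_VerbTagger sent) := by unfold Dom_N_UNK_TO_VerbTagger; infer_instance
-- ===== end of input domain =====

-- B drops A's skip-counter state machine and triple emission for a stateless per-index
-- neighbour check producing the same list (objective: simpler).

-- ===== PORT A =====
-- Python's `(i)<0 | (i+2)>=len(sent)` parses as the chained comparison
-- i < (0 | (i+2)) >= len(sent), i.e. (i < i+2) and (i+2 >= len(sent)), i.e. i+2 >= len(sent).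
-- All list indices taken in the loop are in range, so List.getD is exact here.
def N_UNK_TO_VerbTagger.loop (sent : List (String × String)) (i skip : Nat)
    (acc : List (String × String)) : List (String × String) :=
  if h : i < sent.length then
    if skip > 0 then
      N_UNK_TO_VerbTagger.loop sent (i+1) (skip-1) acc
    else if i + 2 ≥ sent.length then
      N_UNK_TO_VerbTagger.loop sent (i+1) skip (acc ++ [sent.getD i ("", "")])
    else
      let leftContext := sent.getD i ("", "")
      let target := sent.getD (i+1) ("", "")
      let rightContext := sent.getD (i+2) ("", "")
      if PySem.Str.startswith leftContext.2 "N" && (rightContext.2 == "TO") && (target.2 == "UNK") then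
        N_UNK_TO_VerbTagger.loop sent (i+1) 2 (acc ++ [leftContext] ++ [(target.1, "V")] ++ [rightContext])
      else
        N_UNK_TO_VerbTagger.loop sent (i+1) skip (acc ++ [leftContext])
  else acc
termination_by sent.length - i
decreasing_by all_goals omega

def N_UNK_TO_VerbTagger (sent : List (String × String)) : List (String × String) :=
  N_UNK_TO_VerbTagger.loop sent 0 0 []

-- ===== PORT B =====
def N_UNK_TO_VerbTagger_alt.retag (sent : List (String × String)) (j : Nat) : Bool :=
  (1 ≤ j) && (j + 1 < sent.length)
    && ((sent.getD j ("", "")).2 == "UNK")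
    && PySem.Str.startswith (sent.getD (j-1) ("", "")).2 "N"
    && ((sent.getD (j+1) ("", "")).2 == "TO")

def N_UNK_TO_VerbTagger_alt (sent : List (String × String)) : List (String × String) :=
  (List.range sent.length).map (fun j =>
    if N_UNK_TO_VerbTagger_alt.retag sent j then ((sent.getD j ("", "")).1, "V")
    else sent.getD j ("", ""))

-- ===== PRECONDITION & SPEC =====
def Spec_N_UNK_TO_VerbTagger (sent : List (String × String)) (out : List (String × String)) : Prop := out = N_UNK_TO_VerbTagger_alt sent
instance (sent : List (String × String)) (out : List (String × String)) : Decidable (Spec_N_UNK_TO_VerbTagger sent out) := by unfold Spec_N_UNK_TO_VerbTagger; infer_instance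

-- ===== CLAIM (what is proved, stated in full; the proofs are below) =====
def Claim_equal_N_UNK_TO_VerbTagger : Prop := ∀ (sent : List (String × String)), Dom_N_UNK_TO_VerbTagger sent → Spec_N_UNK_TO_VerbTagger sent (N_UNK_TO_VerbTagger sent)

-- ===== LEMMAS AND PROOFS =====

-- abbreviation used only below the claim block
def pvF (sent : List (String × String)) (j : Nat) : String × String :=
  if N_UNK_TO_VerbTagger_alt.retag sent j then ((sent.getD j ("", "")).1, "V")
  else sent.getD j ("", "")

theorem pvRange'_cons {i m : ℕ} (h : 0 < m) :
    List.range' i m = i :: List.range' (i+1) (m-1) := by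
  cases m with
  | zero => omega
  | succ m => simp [List.range'_succ]

-- core invariant: from a fresh position i (skip = 0, position i cannot be a retag target),
-- A's loop appends exactly B's stateless tail
theorem pvLoop_eq (sent : List (String × String)) :
    ∀ (k i : Nat) (acc : List (String × String)), sent.length - i ≤ k →
      N_UNK_TO_VerbTagger_alt.retag sent i = false →
      N_UNK_TO_VerbTagger.loop sent i 0 acc
        = acc ++ (List.range' i (sent.length - i)).map (pvF sent) := by
  intro k
  induction k with
  | zero =>
    intro i acc hk hri
    have hin : ¬ i < sent.length := by omega
    rw [N_UNK_TO_VerbTagger.loop]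
    simp [hin, show sent.length - i = 0 by omega]
  | succ k ih =>
    intro i acc hk hri
    by_cases hin : i < sent.length
    · rw [N_UNK_TO_VerbTagger.loop]
      simp only [hin, dite_true, Nat.lt_irrefl, if_false, gt_iff_lt]
      by_cases hend : i + 2 ≥ sent.length
      · -- tail of the list: emit sent[i], no match possible at i
        simp only [hend, if_true]
        have hri1 : N_UNK_TO_VerbTagger_alt.retag sent (i+1) = false := by
          unfold N_UNK_TO_VerbTagger_alt.retag
          simp only [Bool.and_eq_false_iff]
          left; left; left; right
          simp; omega
        rw [ih (i+1) _ (by omega) hri1]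
        rw [pvRange'_cons (i := i) (m := sent.length - i) (by omega)]
        have : pvF sent i = sent.getD i ("", "") := by unfold pvF; rw [hri]; simp
        simp [this, show sent.length - i - 1 = sent.length - (i+1) by omega]
      · simp only [hend, if_false]
        by_cases hm : (PySem.Str.startswith (sent.getD i ("", "")).2 "N"
            && ((sent.getD (i+2) ("", "")).2 == "TO")
            && ((sent.getD (i+1) ("", "")).2 == "UNK")) = true
        · -- match at i: A emits three tokens then skips two positions
          simp only [hm, if_true]
          have hm' := hm
          simp only [Bool.and_eq_true] at hm'
          obtain ⟨⟨hN, hTO⟩, hUNK⟩ := hm'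
          have hTO' : (sent.getD (i+2) ("", "")).2 = "TO" := eq_of_beq hTO
          have hUNK' : (sent.getD (i+1) ("", "")).2 = "UNK" := eq_of_beq hUNK
          -- unfold the two skip steps
          have hskip : ∀ A, N_UNK_TO_VerbTagger.loop sent (i+1) 2 A
              = N_UNK_TO_VerbTagger.loop sent (i+3) 0 A := by
            intro A
            rw [N_UNK_TO_VerbTagger.loop]
            simp only [show i + 1 < sent.length by omega, dite_true, show (0:Nat) < 2 by omega,
              if_true]
            rw [N_UNK_TO_VerbTagger.loop]
            simp only [show i + 2 < sent.length by omega, dite_true, gt_iff_lt]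
            norm_num
          rw [hskip]
          have hri3 : N_UNK_TO_VerbTagger_alt.retag sent (i+3) = false := by
            unfold N_UNK_TO_VerbTagger_alt.retag
            simp only [Bool.and_eq_false_iff]
            left; right
            simp only [show i + 3 - 1 = i + 2 by omega]
            rw [eq_of_beq hTO]
            decide
          rw [ih (i+3) _ (by omega) hri3]
          have h1 : pvF sent i = sent.getD i ("", "") := by unfold pvF; rw [hri]; simp
          have h2 : pvF sent (i+1) = ((sent.getD (i+1) ("", "")).1, "V") := by
            unfold pvF
            have : N_UNK_TO_VerbTagger_alt.retag sent (i+1) = true := by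
              unfold N_UNK_TO_VerbTagger_alt.retag
              simp only [show i + 1 - 1 = i by omega, hN, hUNK', hTO']
              simp [show i + 1 + 1 < sent.length by omega]
            rw [this]; simp
          have h3 : pvF sent (i+2) = sent.getD (i+2) ("", "") := by
            unfold pvF
            have : N_UNK_TO_VerbTagger_alt.retag sent (i+2) = false := by
              unfold N_UNK_TO_VerbTagger_alt.retag
              simp only [Bool.and_eq_false_iff]
              left; right
              simp only [show i + 2 - 1 = i + 1 by omega]
              rw [eq_of_beq hUNK]
              decide
            rw [this]; simp
          rw [pvRange'_cons (i := i) (m := sent.length - i) (by omega),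
              pvRange'_cons (m := sent.length - i - 1) (by omega),
              pvRange'_cons (m := sent.length - i - 1 - 1) (by omega)]
          simp only [List.map_cons, h1, h2, h3]
          simp [show sent.length - i - 1 - 1 - 1 = sent.length - (i+3) by omega,
                show i + 1 + 1 = i + 2 by omega, show i + 2 + 1 = i + 3 by omega]
        · -- no match at i: emit sent[i] and continue fresh at i+1
          simp only [hm, Bool.false_eq_true, if_false]
          have hri1 : N_UNK_TO_VerbTagger_alt.retag sent (i+1) = false := by
            unfold N_UNK_TO_VerbTagger_alt.retag
            simp only [Bool.and_eq_false_iff, show i + 1 - 1 = i by omega]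
            rcases Bool.and_eq_false_iff.mp (Bool.eq_false_iff.mpr hm ) with h | h
            · rcases Bool.and_eq_false_iff.mp h with h' | h'
              · left; right; exact h'
              · right; exact h'
            · left; left; right; exact h
          rw [ih (i+1) _ (by omega) hri1]
          rw [pvRange'_cons (i := i) (m := sent.length - i) (by omega)]
          have : pvF sent i = sent.getD i ("", "") := by unfold pvF; rw [hri]; simp
          simp [this, show sent.length - i - 1 = sent.length - (i+1) by omega]
    · rw [N_UNK_TO_VerbTagger.loop]
      simp [hin, show sent.length - i = 0 by omega]

-- ===== VERDICT (by name: the statement is the Claim_ definition above) =====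
theorem N_UNK_TO_VerbTagger_spec : Claim_equal_N_UNK_TO_VerbTagger := by
  intro sent _
  unfold Spec_N_UNK_TO_VerbTagger N_UNK_TO_VerbTagger N_UNK_TO_VerbTagger_alt
  rw [pvLoop_eq sent sent.length 0 [] (by omega)
      (by unfold N_UNK_TO_VerbTagger_alt.retag; simp)]
  simp [List.range_eq_range', pvF]
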